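-- pv_equiv track=rewrite | github.com/Theking1660/Learning_ICPC | Join_the_Game.py | comprobar
-- ===== SOURCE A (Python) =====
-- def comprobar(a,b,c,cadena):
--
--   if(a==0 and b==0 and c==0):
--      return "Yes",cadena
--   while (b!=c and   a>0 ):
--     a = a-1
--     b = b - 1
--     c = c+2
--     cadena = cadena +"C"
--   if(b == c):
--     while(b > 0 and c >0):
--        b = b - 1
--        c = c - 1
--        a = a+2
--        cadena = cadena +"A"
--     return  "Yes",cadena
--   else:
--      return "No",cadena
-- ===== SOURCE B (Python) =====
-- def comprobar(a, b, c, cadena):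
--     d = b - c
--     amax = a if a > 0 else 0
--     if d >= 0 and d % 3 == 0 and d // 3 <= amax:
--         k = d // 3
--         m = b - k if b - k > 0 else 0
--         return "Yes", cadena + "C" * k + "A" * m
--     return "No", cadena + "C" * amax
-- ===== Notes on version B (the rewrite author's own statement) =====
-- stated objective: faster
-- what changed: Replaces both simulation while-loops by a closed form: the first loop's iteration count is k=d//3 (d=b-c) exactly when d>=0, d%3==0 and d//3<=max(a,0) (then the answer is Yes with max(b-k,0) 'A's), otherwise k=max(a,0) and the answer is No; the strings are built with string multiplication.
import Mathlib
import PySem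

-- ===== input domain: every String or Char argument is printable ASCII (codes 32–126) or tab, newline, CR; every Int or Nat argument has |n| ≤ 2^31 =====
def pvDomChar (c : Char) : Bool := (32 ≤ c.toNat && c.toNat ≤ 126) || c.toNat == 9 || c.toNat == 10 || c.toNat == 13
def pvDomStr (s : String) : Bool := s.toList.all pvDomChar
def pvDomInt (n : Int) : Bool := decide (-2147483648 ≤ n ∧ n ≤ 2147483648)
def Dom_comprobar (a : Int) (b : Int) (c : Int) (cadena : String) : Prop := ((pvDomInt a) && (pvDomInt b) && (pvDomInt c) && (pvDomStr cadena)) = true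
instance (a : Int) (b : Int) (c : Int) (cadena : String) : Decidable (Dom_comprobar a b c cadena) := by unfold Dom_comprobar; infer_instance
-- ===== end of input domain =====

-- B replaces A's two simulation while-loops by a closed-form count and two string repetitions (objective: faster, constant-factor).

-- ===== PORT A =====
-- first while-loop of A: while b != c and a > 0: a -= 1; b -= 1; c += 2; cadena += "C"
def comprobarLoop1 (a b c : Int) (cadena : String) : Int × Int × Int × String :=
  if b ≠ c ∧ a > 0 then comprobarLoop1 (a - 1) (b - 1) (c + 2) (cadena ++ "C")
  else (a, b, c, cadena)
termination_by a.toNat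
decreasing_by omega

-- second while-loop of A: while b > 0 and c > 0: b -= 1; c -= 1; a += 2; cadena += "A"
def comprobarLoop2 (b c a : Int) (cadena : String) : String :=
  if b > 0 ∧ c > 0 then comprobarLoop2 (b - 1) (c - 1) (a + 2) (cadena ++ "A")
  else cadena
termination_by b.toNat
decreasing_by omega

def comprobar (a : Int) (b : Int) (c : Int) (cadena : String) : String × String :=
  if a = 0 ∧ b = 0 ∧ c = 0 then ("Yes", cadena)
  else
    let r := comprobarLoop1 a b c cadena
    if r.2.1 = r.2.2.1 then ("Yes", comprobarLoop2 r.2.1 r.2.2.1 r.1 r.2.2.2)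
    else ("No", r.2.2.2)

-- ===== PORT B =====
-- "C" * n  (Python repetition; empty for n ≤ 0)
def pyRepeat (ch : Char) (n : Int) : String := String.ofList (List.replicate n.toNat ch)

def comprobar_alt (a : Int) (b : Int) (c : Int) (cadena : String) : String × String :=
  let d := b - c
  let amax := if a > 0 then a else 0
  if 0 ≤ d ∧ PySem.Int.mod d 3 = 0 ∧ PySem.Int.floordiv d 3 ≤ amax then
    let k := PySem.Int.floordiv d 3
    let m := if b - k > 0 then b - k else 0
    ("Yes", cadena ++ pyRepeat 'C' k ++ pyRepeat 'A' m)
  else ("No", cadena ++ pyRepeat 'C' amax)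

-- ===== PRECONDITION & SPEC =====
def Spec_comprobar (a : Int) (b : Int) (c : Int) (cadena : String) (out : String × String) : Prop := out = comprobar_alt a b c cadena
instance (a : Int) (b : Int) (c : Int) (cadena : String) (out : String × String) : Decidable (Spec_comprobar a b c cadena out) := by unfold Spec_comprobar; infer_instance

-- ===== CLAIM (what is proved, stated in full; the proofs are below) =====
def Claim_equal_comprobar : Prop := ∀ (a : Int) (b : Int) (c : Int) (cadena : String), Dom_comprobar a b c cadena → Spec_comprobar a b c cadena (comprobar a b c cadena)

-- ===== LEMMAS AND PROOFS =====

-- proof-only helpers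
def kOf (a b c : Int) : Int :=
  if 0 ≤ b - c ∧ (b - c) % 3 = 0 then min (max a 0) ((b - c) / 3) else max a 0

theorem kOf_nonneg (a b c : Int) : 0 ≤ kOf a b c := by
  unfold kOf; split_ifs with h
  · have : 0 ≤ (b - c) / 3 := by omega
    omega
  · omega

theorem repeat_congr (ch : Char) (n m : Int) (h : n.toNat = m.toNat) :
    pyRepeat ch n = pyRepeat ch m := by unfold pyRepeat; rw [h]

theorem append_repeat_succ (s : String) (ch : Char) (n m : Int) (h : n.toNat + 1 = m.toNat) :
    (s ++ String.ofList [ch]) ++ pyRepeat ch n = s ++ pyRepeat ch m := by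
  unfold pyRepeat
  rw [String.append_assoc]
  congr 1
  rw [← String.ofList_append]
  congr 1
  rw [← h]
  rfl

theorem repeat_zero (ch : Char) (n : Int) (h : n ≤ 0) : pyRepeat ch n = "" := by
  unfold pyRepeat
  rw [Int.toNat_of_nonpos h]
  rfl

-- closed form of A's first loop
theorem loop1_eq (a b c : Int) (cadena : String) :
    comprobarLoop1 a b c cadena =
      (a - kOf a b c, b - kOf a b c, c + 2 * kOf a b c, cadena ++ pyRepeat 'C' (kOf a b c)) := by
  fun_induction comprobarLoop1 a b c cadena with
  | case1 a b c cadena h ih =>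
    obtain ⟨hbc, ha⟩ := h
    have hk : kOf a b c = kOf (a - 1) (b - 1) (c + 2) + 1 := by
      unfold kOf
      have h3 : b - 1 - (c + 2) = b - c - 3 := by ring
      rw [h3]
      split_ifs with h1 h2 h2 <;> omega
    have hk' := kOf_nonneg (a - 1) (b - 1) (c + 2)
    rw [ih, hk]
    simp only [Prod.mk.injEq]
    refine ⟨by omega, by omega, by omega, ?_⟩
    have hC : ("C" : String) = String.ofList ['C'] := rfl
    rw [hC]
    exact append_repeat_succ cadena 'C' _ _ (by omega)
  | case2 a b c cadena h =>
    have hk : kOf a b c = 0 := by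
      unfold kOf
      split_ifs with h1
      · have : 0 ≤ (b - c) / 3 := by omega
        omega
      · omega
    rw [hk]
    simp only [Prod.mk.injEq]
    refine ⟨by omega, by omega, by omega, ?_⟩
    rw [repeat_zero 'C' 0 (by omega)]
    simp

-- closed form of A's second loop on the diagonal
theorem loop2_eq (b a : Int) (cadena : String) :
    comprobarLoop2 b b a cadena = cadena ++ pyRepeat 'A' b := by
  have H : ∀ (n : Nat) (b a : Int) (cad : String), b.toNat = n →
      comprobarLoop2 b b a cad = cad ++ pyRepeat 'A' b := by
    intro n
    induction n with
    | zero =>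
      intro b a cad hn
      rw [comprobarLoop2, if_neg (by omega), repeat_zero 'A' b (by omega)]
      simp
    | succ m ih =>
      intro b a cad hn
      rw [comprobarLoop2, if_pos ⟨by omega, by omega⟩, ih (b - 1) (a + 2) _ (by omega)]
      have hA : ("A" : String) = String.ofList ['A'] := rfl
      rw [hA]
      exact append_repeat_succ cad 'A' _ _ (by omega)
  exact H b.toNat b a cadena rfl

-- the common closed form both programs reach
def closedForm (a b c : Int) (cadena : String) : String × String :=
  if 0 ≤ b - c ∧ (b - c) % 3 = 0 ∧ (b - c) / 3 ≤ max a 0 then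
    ("Yes", cadena ++ pyRepeat 'C' ((b - c) / 3) ++ pyRepeat 'A' (b - (b - c) / 3))
  else ("No", cadena ++ pyRepeat 'C' (max a 0))

theorem B_eq_closed (a b c : Int) (cadena : String) :
    comprobar_alt a b c cadena = closedForm a b c cadena := by
  unfold comprobar_alt closedForm
  dsimp only
  rw [PySem.Int.mod_eq_emod_of_pos (by omega : (0:Int) < 3),
      PySem.Int.floordiv_eq_ediv_of_pos (by omega : (0:Int) < 3)]
  have hamax : (if a > 0 then a else 0) = max a 0 := by split_ifs <;> omega
  rw [hamax]
  split_ifs with h hm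
  · rfl
  · simp only [Prod.mk.injEq, true_and]
    congr 1
    exact repeat_congr 'A' _ _ (by omega)
  · rfl

theorem A_eq_closed (a b c : Int) (cadena : String) :
    comprobar a b c cadena = closedForm a b c cadena := by
  unfold comprobar closedForm
  dsimp only
  have hknn := kOf_nonneg a b c
  simp only [loop1_eq]
  by_cases h0 : a = 0 ∧ b = 0 ∧ c = 0
  · obtain ⟨ha, hb, hc⟩ := h0
    subst ha; subst hb; subst hc
    norm_num
    rw [repeat_zero 'C' 0 (by omega), repeat_zero 'A' 0 (by omega)]
    simp
  · rw [if_neg h0]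
    set k := kOf a b c with hkdef
    by_cases hC : 0 ≤ b - c ∧ (b - c) % 3 = 0 ∧ (b - c) / 3 ≤ max a 0
    · -- then k = (b-c)/3 and loop1 ends with b' = c'
      have hkeq : k = (b - c) / 3 := by
        rw [hkdef]; unfold kOf
        rw [if_pos ⟨hC.1, hC.2.1⟩]
        omega
      have hbc : b - k = c + 2 * k := by omega
      rw [if_pos hbc, if_pos hC, ← hbc, loop2_eq]
      rw [hkeq]
    · -- loop1 stops with b' ≠ c', answer No, k = max a 0
      have hkeq : k = max a 0 := by
        rw [hkdef]; unfold kOf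
        split_ifs with h1
        · have : ¬ ((b - c) / 3 ≤ max a 0) := fun hh => hC ⟨h1.1, h1.2, hh⟩
          omega
        · rfl
      have hne : b - c ≠ 3 * k := by
        rw [hkdef]; unfold kOf
        split_ifs with h1
        · have : ¬ ((b - c) / 3 ≤ max a 0) := fun hh => hC ⟨h1.1, h1.2, hh⟩
          omega
        · omega
      rw [if_neg (by omega : ¬ (b - k = c + 2 * k)), if_neg hC, hkeq]

theorem main_eq (a b c : Int) (cadena : String) :
    comprobar a b c cadena = comprobar_alt a b c cadena :=
  (A_eq_closed a b c cadena).trans (B_eq_closed a b c cadena).symm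

-- ===== VERDICT (by name: the statement is the Claim_ definition above) =====
theorem comprobar_spec : Claim_equal_comprobar := by
  intro a b c cadena _
  unfold Spec_comprobar
  exact main_eq a b c cadena
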